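-- pv_equiv track=rewrite | github.com/chenzongyao200127/leetcode_in_rust | src/600_不含连续1的非负整数.py | findIntegers
-- ===== SOURCE A (Python) =====
-- def findIntegers(n: int) -> int:
--     dp = [0] * 31
--     dp[0] = 1
--     dp[1] = 1
--     for i in range(2, 31):
--         dp[i] = dp[i - 1] + dp[i - 2]
--
--     pre = 0
--     res = 0
--
--     for i in range(29, -1, -1):
--         val = (1 << i)
--         if n & val:
--             res += dp[i + 1]
--             if pre == 1:
--                 break
--             pre = 1
--         else:
--             pre = 0
--
--         if i == 0:
--             res += 1
--
--     return res
-- ===== SOURCE B (Python) =====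
-- def findIntegers(n: int) -> int:
--     # Digit DP over bit positions 29..0 instead of A's greedy Fibonacci-table scan.
--     def count(k: int):
--         # (#bit strings of length k with no "11" when the previous bit was 0,
--         #  same when the previous bit was 1)
--         if k == 0:
--             return (1, 1)
--         c = count(k - 1)
--         return (c[0] + c[1], c[0])
--
--     def go(k: int, prev: int) -> int:
--         # numbers whose low k bits are <= n's low k bits, no "11" anywhere,
--         # given the already-fixed bit just above is prev (tight prefix so far)
--         if k == 0:
--             return 1
--         b = (n >> (k - 1)) & 1
--         if b == 0:
--             return go(k - 1, 0)
--         if prev == 1: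
--             return count(k - 1)[0]
--         return count(k - 1)[0] + go(k - 1, 1)
--
--     return go(30, 0)
-- ===== Notes on version B (the rewrite author's own statement) =====
-- stated objective: alternative
-- what changed: Replaces A's precomputed Fibonacci table plus greedy high-to-low bit scan with break by a recursive digit DP over bit positions carrying the tight/previous-bit state, with a pair-returning recursion for the free counts.
import Mathlib
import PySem

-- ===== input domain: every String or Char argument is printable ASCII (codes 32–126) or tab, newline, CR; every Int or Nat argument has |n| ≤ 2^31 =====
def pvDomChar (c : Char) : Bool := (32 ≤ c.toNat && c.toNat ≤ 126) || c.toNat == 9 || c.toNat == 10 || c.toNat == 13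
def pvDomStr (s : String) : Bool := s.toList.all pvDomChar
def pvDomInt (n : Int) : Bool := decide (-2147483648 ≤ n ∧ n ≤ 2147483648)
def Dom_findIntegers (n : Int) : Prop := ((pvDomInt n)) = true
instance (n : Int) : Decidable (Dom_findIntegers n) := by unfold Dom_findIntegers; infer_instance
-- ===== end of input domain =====

-- B replaces A's Fibonacci-table greedy scan by a recursive digit DP over bit positions; alternative decomposition, same cost class.

-- ===== PORT A =====
-- A's Fibonacci table dp (first loop of A)
def dpA : List Int :=
  (PySem.List.pyRange 2 31 1).foldl
    (fun dp i => dp.set i.toNat (PySem.List.pyGetD dp (i - 1) 0 + PySem.List.pyGetD dp (i - 2) 0))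
    (((List.replicate 31 (0 : Int)).set 0 1).set 1 1)

-- one iteration of A's for-loop over i = 29..0; state (pre, res, broken), broken models `break`
def stepA (n : Int) (s : Int × Int × Bool) (i : Int) : Int × Int × Bool :=
  if s.2.2 then s
  else
    let val : Int := (1 : Int) <<< i.toNat        -- 1 << i (i ≥ 0 on every iteration)
    let t : Int × Int × Bool :=
      if PySem.Int.band n val ≠ 0 then            -- if n & val:
        if s.1 == 1 then (s.1, s.2.1 + PySem.List.pyGetD dpA (i + 1) 0, true)   -- break
        else (1, s.2.1 + PySem.List.pyGetD dpA (i + 1) 0, false)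
      else (0, s.2.1, false)
    if t.2.2 then t
    else if i == 0 then (t.1, t.2.1 + 1, false) else t   -- if i == 0: res += 1

def findIntegers (n : Int) : Int :=
  ((PySem.List.pyRange 29 (-1) (-1)).foldl (stepA n) (0, 0, false)).2.1

-- ===== PORT B =====
-- count(k) of Source B (memo-free pair recursion, value-identical)
def altCount : Nat → Int × Int
  | 0 => (1, 1)
  | k + 1 => ((altCount k).1 + (altCount k).2, (altCount k).1)

-- go(k, prev) of Source B
def altGo (n : Int) : Nat → Int → Int
  | 0, _ => 1
  | k + 1, prev =>
    let b := PySem.Int.band (n >>> k) 1           -- (n >> (k-1)) & 1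
    if b == 0 then altGo n k 0
    else if prev == 1 then (altCount k).1
    else (altCount k).1 + altGo n k 1

def findIntegers_alt (n : Int) : Int := altGo n 30 0

-- ===== PRECONDITION & SPEC =====
def Spec_findIntegers (n : Int) (out : Int) : Prop := out = findIntegers_alt n
instance (n : Int) (out : Int) : Decidable (Spec_findIntegers n out) := by unfold Spec_findIntegers; infer_instance

-- ===== CLAIM (what is proved, stated in full; the proofs are below) =====
def Claim_equal_findIntegers : Prop := ∀ (n : Int), Dom_findIntegers n → Spec_findIntegers n (findIntegers n)

-- ===== LEMMAS AND PROOFS =====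

-- the index list [29, 28, …, 0] of A's second loop, as a countdown
def descL : Nat → List Int
  | 0 => []
  | k + 1 => (k : Int) :: descL k

lemma range_eq_descL : PySem.List.pyRange 29 (-1) (-1) = descL 30 := by decide

lemma fold_done (n : Int) (l : List Int) (pre res : Int) :
    l.foldl (stepA n) (pre, res, true) = (pre, res, true) := by
  induction l with
  | nil => rfl
  | cons i l ih => simpa [stepA] using ih

-- A's table entry dp[i+1] is B's free count for i remaining bits
lemma dpA_get (i : Nat) (h : i < 30) :
    PySem.List.pyGetD dpA ((i : Int) + 1) 0 = (altCount i).1 := by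
  revert h; revert i; decide

-- Python's `n & (1 << k)` is zero exactly when B's bit `(n >> k) & 1` is zero (two's complement)
lemma bit_zero_iff (n : Int) (k : Nat) :
    (PySem.Int.band n ((1 : Int) <<< k) = 0) ↔ (PySem.Int.band (n >>> k) 1 = 0) := by
  have hpow : (1 : Int) <<< k = ((2 ^ k : Nat) : Int) := by simp [Int.shiftLeft_eq]
  have hmod : PySem.Int.band (n >>> k) 1 = PySem.Int.mod (n >>> k) 2 := PySem.Int.band_one _
  have hsr : n >>> k = n / ((2 ^ k : Nat) : Int) := by simpa using Int.shiftRight_eq_div_pow n k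
  have hmod2 : ∀ x : Int, PySem.Int.mod x 2 = x % 2 := fun x => by
    simp [PySem.Int.mod, Int.fmod_eq_emod]
  have hppos : (0 : Nat) < 2 ^ k := by positivity
  rw [hpow, hmod, hmod2, hsr]
  by_cases hn : 0 ≤ n
  · rw [PySem.Int.band_of_nonneg hn (by positivity), Int.toNat_natCast]
    have hcast : n = ((n.toNat : Nat) : Int) := (Int.toNat_of_nonneg hn).symm
    rw [hcast, ← Int.natCast_div]
    simp only [Int.toNat_natCast]
    have htb : n.toNat.testBit k = decide (n.toNat / 2 ^ k % 2 = 1) :=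
      Nat.testBit_eq_decide_div_mod_eq
    rw [Nat.and_two_pow, htb]
    have hcm : ((n.toNat / 2 ^ k : Nat) : Int) % 2 = ((n.toNat / 2 ^ k % 2 : Nat) : Int) := by
      push_cast; ring
    rw [hcm]
    have hlt : n.toNat / 2 ^ k % 2 < 2 := Nat.mod_lt _ (by norm_num)
    by_cases hx : n.toNat / 2 ^ k % 2 = 1
    · rw [hx]
      constructor
      · intro h; exfalso
        have h' : (decide ((1:Nat) = 1)).toNat * 2 ^ k = 0 := by exact_mod_cast h
        simp at h'
      · intro h; exfalso
        have h' : (1 : Nat) = 0 := by exact_mod_cast h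
        omega
    · have hx0 : n.toNat / 2 ^ k % 2 = 0 := by omega
      rw [hx0]
      simp
  · -- negative n: two's complement through m = -n-1
    rw [Int.not_le] at hn
    have hmdef : n = -(((-n - 1).toNat : Nat) : Int) - 1 := by omega
    set m : Nat := (-n - 1).toNat with hm
    have hband : PySem.Int.band n ((2 ^ k : Nat) : Int) = ((2 ^ k - (2 ^ k &&& m) : Nat) : Int) := by
      show PySem.Int.band n ((2 ^ k : Nat) : Int) = _
      unfold PySem.Int.band
      rw [if_neg (by omega), if_pos (by positivity), Int.toNat_natCast]
    rw [hband]
    have hand : 2 ^ k &&& m = (m.testBit k).toNat * 2 ^ k := by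
      rw [Nat.and_comm, Nat.and_two_pow]
    have htb : m.testBit k = decide (m / 2 ^ k % 2 = 1) := Nat.testBit_eq_decide_div_mod_eq
    -- the floor division of n by 2^k
    obtain ⟨q, r, hqr, hrlt⟩ : ∃ q r : Nat, m = 2 ^ k * q + r ∧ r < 2 ^ k :=
      ⟨m / 2 ^ k, m % 2 ^ k, (Nat.div_add_mod m (2 ^ k)).symm, Nat.mod_lt _ hppos⟩
    have hq : m / 2 ^ k = q := by
      rw [hqr]; rw [Nat.mul_add_div hppos]; simp [Nat.div_eq_of_lt hrlt]
    have hsplit : n = (((2 ^ k : Nat) : Int) - r - 1) + (-(q : Int) - 1) * ((2 ^ k : Nat) : Int) := by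
      have hqr' : (m : Int) = ((2 ^ k : Nat) : Int) * q + r := by exact_mod_cast hqr
      rw [hmdef]; ring_nf; ring_nf at hqr'; linarith [hqr']
    have hdiv : n / ((2 ^ k : Nat) : Int) = -(q : Int) - 1 := by
      rw [hsplit, Int.add_mul_ediv_right _ _ (by positivity : ((2 ^ k : Nat) : Int) ≠ 0)]
      rw [Int.ediv_eq_zero_of_lt (by omega) (by omega)]
      ring
    rw [hdiv, hand, htb, hq]
    by_cases hx : q % 2 = 1
    · rw [hx]
      constructor
      · intro _; omega
      · intro _; simp
    · have hx0 : q % 2 = 0 := by omega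
      rw [hx0]
      constructor
      · intro h; exfalso
        have h' : (2 ^ k : Nat) - (decide ((0:Nat) = 1)).toNat * 2 ^ k = 0 := by exact_mod_cast h
        simp at h'
      · intro h; exfalso; omega

lemma main_loop (n : Int) : ∀ k, k < 30 → ∀ pre res : Int,
    ((descL (k + 1)).foldl (stepA n) (pre, res, false)).2.1 = res + altGo n (k + 1) pre := by
  intro k
  induction k with
  | zero =>
    intro _ pre res
    have h1 : PySem.List.pyGetD dpA 1 0 = 1 := by decide
    have hA0 : (altCount 0).1 = 1 := rfl
    by_cases h : PySem.Int.band n 1 = 0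
    · simp [descL, stepA, altGo, h]
    · by_cases hp : pre = 1
      · simp [descL, stepA, altGo, h, hp, h1, hA0]
      · simp [descL, stepA, altGo, h, hp, h1, hA0]
        ring
  | succ k ih =>
    intro hk pre res
    have hdesc : descL (k + 1 + 1) = ((k + 1 : Nat) : Int) :: descL (k + 1) := rfl
    have hb := bit_zero_iff n (k + 1)
    have hz : (((k + 1 : Nat) : Int) == 0) = false := by
      simp
      omega
    have hd : PySem.List.pyGetD dpA (((k : Nat) : Int) + 1 + 1) 0 = (altCount (k + 1)).1 := by
      have h0 := dpA_get (k + 1) hk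
      push_cast at h0
      exact h0
    rw [hdesc, List.foldl_cons]
    by_cases h : PySem.Int.band n ((1 : Int) <<< (k + 1 : Nat)) = 0
    · have h' : PySem.Int.band (n >>> (k + 1 : Nat)) 1 = 0 := hb.mp h
      have hstep : stepA n (pre, res, false) ((k + 1 : Nat) : Int) = (0, res, false) := by
        simp [stepA, h]
        omega
      rw [hstep, ih (by omega) 0 res]
      simp [altGo, h']
    · have h' : ¬ PySem.Int.band (n >>> (k + 1 : Nat)) 1 = 0 := fun hc => h (hb.mpr hc)
      by_cases hp : pre = 1
      · have hstep : stepA n (pre, res, false) ((k + 1 : Nat) : Int) =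
            (pre, res + (altCount (k + 1)).1, true) := by
          simp [stepA, h, hp, hd]
        rw [hstep, fold_done]
        simp [altGo, h', hp]
      · have hstep : stepA n (pre, res, false) ((k + 1 : Nat) : Int) =
            (1, res + (altCount (k + 1)).1, false) := by
          simp [stepA, h, hp, hd]
          omega
        rw [hstep, ih (by omega) 1 (res + (altCount (k + 1)).1)]
        simp [altGo, h', hp]
        ring

-- ===== VERDICT (by name: the statement is the Claim_ definition above) =====
theorem findIntegers_spec : Claim_equal_findIntegers := by
  intro n _
  unfold Spec_findIntegers findIntegers findIntegers_alt
  rw [range_eq_descL]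
  have := main_loop n 29 (by omega) 0 0
  simpa using this
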